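-- pv_equiv track=rewrite | github.com/MarcusSalzer/html_highlight | src/text_process.py | bracket_levels
-- ===== SOURCE A (Python) =====
-- def bracket_levels(tags: list[str]) -> tuple[list[str], list[int]]:
--     """Rename bracket tags from br_op/cl to br{n}.
--
--     ## Returns
--     - tags_new (list[str]): modified tags
--     - brac_level (list[int]): bracket depth for all tokens."""
--     brac_level = []
--     current_level = 0
--     tags_new = tags.copy()
--     for i in range(len(tags_new)):
--         if tags_new[i] == "brop":
--             brac_level.append(current_level)
--             tags_new[i] = f"br{current_level}"
--             current_level += 1
--         elif tags_new[i] == "brcl":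
--             current_level -= 1
--             tags_new[i] = f"br{current_level}"
--             brac_level.append(current_level)
--         else:
--             brac_level.append(current_level)
--
--     return tags_new, brac_level
-- ===== SOURCE B (Python) =====
-- def bracket_levels(tags: list[str]) -> tuple[list[str], list[int]]:
--     """Delta-encoding + prefix-sum formulation: each token contributes a delta
--     (+1 for brop, -1 for brcl, 0 otherwise); the running prefix sums give the
--     depth table, from which levels and renamed tags are read off."""
--     deltas = [(t == "brop") - (t == "brcl") for t in tags]
--     cums = [0]
--     for d in deltas:
--         cums.append(cums[-1] + d)
--     brac_level = [cums[i + 1] if t == "brcl" else cums[i]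
--                   for i, t in enumerate(tags)]
--     tags_new = [f"br{l}" if t in ("brop", "brcl") else t
--                 for t, l in zip(tags, brac_level)]
--     return tags_new, brac_level
-- ===== Notes on version B (the rewrite author's own statement) =====
-- stated objective: alternative
-- what changed: B replaces A's stateful branchy counter loop with a delta-encoding/prefix-sum formulation: tokens are mapped to +1/-1/0 deltas, a prefix-sum table is built once, and both the depth list (cums[i+1] for closers, cums[i] otherwise) and the renamed tags are read off that table by comprehensions.
import Mathlib
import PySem

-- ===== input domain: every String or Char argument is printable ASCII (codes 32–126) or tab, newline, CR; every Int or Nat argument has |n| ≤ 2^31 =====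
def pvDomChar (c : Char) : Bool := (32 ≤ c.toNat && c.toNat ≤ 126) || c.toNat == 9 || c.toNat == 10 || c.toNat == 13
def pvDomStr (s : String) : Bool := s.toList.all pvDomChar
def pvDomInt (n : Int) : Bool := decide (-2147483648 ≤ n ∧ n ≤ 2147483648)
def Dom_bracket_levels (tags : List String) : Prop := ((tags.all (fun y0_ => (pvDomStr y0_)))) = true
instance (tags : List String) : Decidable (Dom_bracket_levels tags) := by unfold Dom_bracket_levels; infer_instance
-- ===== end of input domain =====

-- B replaces A's stateful branchy counter loop with a delta-encoding/prefix-sum table; same value, alternative formulation.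
-- Python A copies the input (tags.copy()), so there is no observable mutation.
-- ===== PORT A =====
-- single pass: consumes tags in order carrying current_level, building tags_new and brac_level together
def bracketAuxA : List String → Int → List String × List Int
  | [], _ => ([], [])
  | t :: ts, lvl =>
    if t = "brop" then
      let r := bracketAuxA ts (lvl + 1)
      (("br" ++ PySem.Int.toStr lvl) :: r.1, lvl :: r.2)
    else if t = "brcl" then
      let r := bracketAuxA ts (lvl - 1)
      (("br" ++ PySem.Int.toStr (lvl - 1)) :: r.1, (lvl - 1) :: r.2)
    else
      let r := bracketAuxA ts lvl
      (t :: r.1, lvl :: r.2)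

def bracket_levels (tags : List String) : List String × List Int :=
  bracketAuxA tags 0

-- ===== PORT B =====
-- pass 1: delta per token ((t=="brop") - (t=="brcl") as int arithmetic on bools)
-- pass 2: prefix sums (the python append-loop over cums, transcribed as scanl)
-- pass 3: read levels off adjacent prefix-sum pairs (cums[i], cums[i+1]); pass 4: rename
def bracket_levels_alt (tags : List String) : List String × List Int :=
  let deltas := tags.map (fun t => (if t = "brop" then (1 : Int) else 0) - (if t = "brcl" then 1 else 0))
  let cums := deltas.scanl (· + ·) 0
  let lv := List.zipWith (fun t p => if t = "brcl" then Prod.snd p else Prod.fst p) tags (cums.zip cums.tail)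
  (List.zipWith (fun t l => if t = "brop" ∨ t = "brcl" then "br" ++ PySem.Int.toStr l else t) tags lv, lv)

-- ===== PRECONDITION & SPEC =====
def Spec_bracket_levels (tags : List String) (out : List String × List Int) : Prop := out = bracket_levels_alt tags
instance (tags : List String) (out : List String × List Int) : Decidable (Spec_bracket_levels tags out) := by unfold Spec_bracket_levels; infer_instance

-- ===== CLAIM (what is proved, stated in full; the proofs are below) =====
def Claim_equal_bracket_levels : Prop := ∀ (tags : List String), Dom_bracket_levels tags → Spec_bracket_levels tags (bracket_levels tags)

-- ===== LEMMAS AND PROOFS =====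
-- the levels list, generalized over the starting level
def bLv (tags : List String) (lvl : Int) : List Int :=
  let deltas := tags.map (fun t => (if t = "brop" then (1 : Int) else 0) - (if t = "brcl" then 1 else 0))
  let cums := deltas.scanl (· + ·) lvl
  List.zipWith (fun t p => if t = "brcl" then Prod.snd p else Prod.fst p) tags (cums.zip cums.tail)

theorem bLv_cons (t : String) (ts : List String) (lvl : Int) :
    bLv (t :: ts) lvl =
      (if t = "brcl" then lvl + ((if t = "brop" then (1 : Int) else 0) - (if t = "brcl" then 1 else 0))
       else lvl) ::
      bLv ts (lvl + ((if t = "brop" then (1 : Int) else 0) - (if t = "brcl" then 1 else 0))) := by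
  cases ts with
  | nil => simp [bLv, List.scanl_cons]
  | cons u us => simp [bLv, List.scanl_cons]

theorem bracketAux_eq (tags : List String) (lvl : Int) :
    bracketAuxA tags lvl =
      (List.zipWith (fun t l => if t = "brop" ∨ t = "brcl" then "br" ++ PySem.Int.toStr l else t)
        tags (bLv tags lvl), bLv tags lvl) := by
  induction tags generalizing lvl with
  | nil => rfl
  | cons t ts ih =>
    rw [bLv_cons]
    by_cases h1 : t = "brop"
    · simp [bracketAuxA, h1, ih (lvl + 1)]
    · by_cases h2 : t = "brcl"
      · simp [bracketAuxA, h2, ih (lvl - 1)]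
        ring_nf
        exact ⟨⟨trivial, trivial⟩, trivial, trivial⟩
      · simp [bracketAuxA, h1, h2, ih lvl]

-- ===== VERDICT (by name: the statement is the Claim_ definition above) =====
theorem bracket_levels_spec : Claim_equal_bracket_levels := by
  intro tags _
  show bracket_levels tags = bracket_levels_alt tags
  simpa [bracket_levels, bracket_levels_alt, bLv] using bracketAux_eq tags 0
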